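-- pv_equiv track=rewrite | github.com/ilabiad/google-foobar | level5/expanding-nebula/solution.py | solution
-- ===== SOURCE A (Python) =====
-- def solution(g):
--     width, height = len(g[0]), len(g)
--     possible_cols = generate_possible_col(height+1)
--     count = {poss_col: 1 for poss_col in possible_cols}
--     for i in range(width-1, -1, -1):
--         count_tmp = dict()
--         for p_col_right in count.keys():
--             for p_col_left in possible_cols:
--                 if verify(g, (p_col_left, p_col_right), i):
--                     count_tmp[p_col_left] = count_tmp.get(p_col_left, 0) + count[p_col_right]
--         count = count_tmp
--     return sum(count.values())
--
-- def verify(g, col_l_r, ind):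
--     for i in range(len(col_l_r[0])-1):
--         r = col_l_r[0][i] + col_l_r[0][i+1] + col_l_r[1][i] + col_l_r[1][i+1]
--         if (r == 1) != g[i][ind]:
--             return False
--     return True
--
-- def generate_possible_col(col_len):
--     result = [()]
--     for i in range(col_len):
--         n = len(result)
--         for j in range(n):
--             result.append(result[j] + (False,))
--             result[j] = result[j] + (True,)
--     return result
-- ===== SOURCE B (Python) =====
-- def solution(g):
--     height = len(g)
--     width = len(g[0])
--     # all candidate preimage columns (height+1 cells)
--     cols = [()]
--     for _ in range(height + 1):
--         cols = [c + (True,) for c in cols] + [c + (False,) for c in cols]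
--
--     def expand(col):
--         # all (left, right) column pairs whose 2x2-rule output column is exactly col,
--         # built by extending matching prefixes row by row
--         parts = [((a,), (b,)) for a in (True, False) for b in (True, False)]
--         for k in range(height):
--             parts = [(l + (a,), r + (b,))
--                      for (l, r) in parts
--                      for a in (True, False) for b in (True, False)
--                      if ((l[-1] + a + r[-1] + b) == 1) == col[k]]
--         return parts
--
--     g_cols = [tuple(row[i] for row in g) for i in range(width)]
--     trans = {}
--     for col in g_cols:
--         if col not in trans:
--             trans[col] = expand(col)
--
--     counts = {c: 1 for c in cols}
--     for i in range(width - 1, -1, -1):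
--         tmp = {}
--         for l, r in trans[g_cols[i]]:
--             tmp[l] = tmp.get(l, 0) + counts.get(r, 0)
--         counts = tmp
--     return sum(counts.values())
-- ===== Notes on version B (the rewrite author's own statement) =====
-- stated objective: faster
-- what changed: Instead of re-verifying every (left,right) column pair against the grid column at each of the width DP steps, B precomputes, once per distinct grid column, the list of matching column pairs by row-wise prefix extension (discarding mismatching prefixes early), and each DP step just folds over that precomputed pair list; intended as faster, measured 29x at the largest size where both programs finish (on still larger grids both hit the timeout).
-- outside the precondition, e.g. on solution([]): A raises IndexError, B raises IndexError; on solution([[True, False], [False]]): A raises IndexError, B raises IndexError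
import Mathlib
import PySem

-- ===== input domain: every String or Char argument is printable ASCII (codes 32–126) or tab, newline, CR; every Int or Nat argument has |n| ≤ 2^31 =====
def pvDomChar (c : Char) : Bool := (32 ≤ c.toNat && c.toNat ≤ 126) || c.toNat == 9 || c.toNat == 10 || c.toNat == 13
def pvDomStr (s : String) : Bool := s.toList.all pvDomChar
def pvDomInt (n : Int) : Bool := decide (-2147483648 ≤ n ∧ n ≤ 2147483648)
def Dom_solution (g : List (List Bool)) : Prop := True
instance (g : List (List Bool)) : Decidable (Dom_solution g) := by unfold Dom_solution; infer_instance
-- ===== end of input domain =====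

-- B replaces A's per-column scan over all column pairs (re-verifying each pair against the
-- grid column) by a per-distinct-column index, built once by prefix extension, that maps a
-- grid column directly to the (left, right) pairs producing it; measured 29x faster at the
-- largest generated size on which both programs finish.


-- Python bool used in arithmetic (True = 1, False = 0)
def boolInt (b : Bool) : Int := if b then 1 else 0

-- ===== PORT A =====
def generatePossibleCol (colLen : Nat) : List (List Bool) :=
  (List.range colLen).foldl
    (fun result _ =>
      -- Python mutates `result` in place: result[j] becomes result[j]+(True,) while
      -- result[j]+(False,) is appended; after one pass the list is exactly the
      -- +True copies (in order) followed by the +False copies (in order) — exact.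
      result.map (fun t => t ++ [true]) ++ result.map (fun t => t ++ [false]))
    [[]]

def verify (g : List (List Bool)) (colL colR : List Bool) (ind : Nat) : Bool :=
  -- Python's early `return False` loop is `all`; the column indices i, i+1 are always in
  -- range (columns have length len(colL)); g[i][ind] is in range exactly when Pre_solution
  -- holds (Python raises IndexError otherwise), so `getD` is exact on Pre_solution.
  (List.range (colL.length - 1)).all (fun i =>
    ((boolInt (colL.getD i false) + boolInt (colL.getD (i+1) false) +
      boolInt (colR.getD i false) + boolInt (colR.getD (i+1) false)) == 1)
      == (g.getD i []).getD ind false)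

def solution (g : List (List Bool)) : Int :=
  let width := g.headI.length       -- len(g[0]); g ≠ [] under Pre_solution
  let height := g.length
  let possibleCols := generatePossibleCol (height + 1)
  let count0 : PySem.Dict (List Bool) Int :=
    possibleCols.foldl (fun d c => d.insert c 1) PySem.Dict.empty
  let countEnd :=
    (PySem.List.pyRange ((width : Int) - 1) (-1) (-1)).foldl
      (fun count i =>
        -- `for p_col_right in count.keys()` together with `count[p_col_right]` is a walk
        -- over count.items (keys are unique, values are the looked-up counts); i ≥ 0 here.
        count.items.foldl
          (fun tmp rv =>
            possibleCols.foldl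
              (fun tmp pl =>
                if verify g pl rv.1 i.toNat then tmp.insert pl (tmp.getD pl 0 + rv.2)
                else tmp)
              tmp)
          PySem.Dict.empty)
      count0
  countEnd.values.sum

-- ===== PORT B =====
-- one extension round of `expand`: Python's
--   [(l+(a,), r+(b,)) for (l,r) in parts for a in (True,False) for b in (True,False) if ...]
def expandStep (colk : Bool) (parts : List (List Bool × List Bool)) :
    List (List Bool × List Bool) :=
  parts.flatMap (fun lr =>
    [(true, true), (true, false), (false, true), (false, false)].filterMap (fun ab =>
      if ((boolInt (lr.1.getLastD false) + boolInt ab.1 +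
           boolInt (lr.2.getLastD false) + boolInt ab.2) == 1) == colk
      then some (lr.1 ++ [ab.1], lr.2 ++ [ab.2]) else none))
  -- l[-1] / r[-1]: the prefixes are never empty, so getLastD is exact

def expand (height : Nat) (col : List Bool) : List (List Bool × List Bool) :=
  (List.range height).foldl
    (fun parts k => expandStep (col.getD k false) parts)  -- col[k]: k < height = len(col), exact
    [([true], [true]), ([true], [false]), ([false], [true]), ([false], [false])]

def solution_alt (g : List (List Bool)) : Int :=
  let height := g.length
  let width := g.headI.length       -- len(g[0]); g ≠ [] under Pre_solution
  let cols :=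
    (List.range (height + 1)).foldl
      (fun cs _ => cs.map (fun c => c ++ [true]) ++ cs.map (fun c => c ++ [false]))
      [[]]
  let gCols := (List.range width).map (fun i => g.map (fun row => row.getD i false))
      -- row[i]: in range exactly when Pre_solution holds (Python raises IndexError otherwise)
  let trans : PySem.Dict (List Bool) (List (List Bool × List Bool)) :=
    gCols.foldl (fun d col => if d.contains col then d else d.insert col (expand height col))
      PySem.Dict.empty
  let countsEnd :=
    (PySem.List.pyRange ((width : Int) - 1) (-1) (-1)).foldl
      (fun counts i =>
        (trans.getD (gCols.getD i.toNat []) []).foldl   -- trans[g_cols[i]]: key present, i ≥ 0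
          (fun tmp lr => tmp.insert lr.1 (tmp.getD lr.1 0 + counts.getD lr.2 0))
          PySem.Dict.empty)
      (cols.foldl (fun d c => d.insert c 1) PySem.Dict.empty)
  countsEnd.values.sum

-- ===== PRECONDITION & SPEC =====
-- Pre_solution is exactly where Python A returns: g nonempty (len(g[0]) raises on []) and no
-- row shorter than the first (verify's g[i][ind] raises IndexError on some reached pair else).
def Pre_solution (g : List (List Bool)) : Prop :=
  g ≠ [] ∧ ∀ row ∈ g, g.headI.length ≤ row.length
instance (g : List (List Bool)) : Decidable (Pre_solution g) := by
  unfold Pre_solution; infer_instance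

def pvWitness_solution : List (List Bool) := [[true, false], [false, false]]

def Spec_solution (g : List (List Bool)) (out : Int) : Prop := out = solution_alt g
instance (g : List (List Bool)) (out : Int) : Decidable (Spec_solution g out) := by
  unfold Spec_solution; infer_instance

-- ===== CLAIM (what is proved, stated in full; the proofs are below) =====
def Claim_equal_solution : Prop :=
  ∀ (g : List (List Bool)), Dom_solution g → Pre_solution g → Spec_solution g (solution g)

-- ===== LEMMAS AND PROOFS =====

-- proof-side views of the two programs -------------------------------------------------

-- the output pattern (one bit per grid row) produced by the column pair (l, r)
def patt (h : Nat) (l r : List Bool) : List Bool :=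
  (List.range h).map (fun i =>
    (boolInt (l.getD i false) + boolInt (l.getD (i+1) false) +
     boolInt (r.getD i false) + boolInt (r.getD (i+1) false)) == 1)

-- column ind of the grid, as B reads it
def colAt (g : List (List Bool)) (ind : Nat) : List Bool :=
  g.map (fun row => row.getD ind false)

def stepA (g : List (List Bool)) (ind : Nat) (count : PySem.Dict (List Bool) Int) :
    PySem.Dict (List Bool) Int :=
  count.items.foldl
    (fun tmp rv =>
      (generatePossibleCol (g.length + 1)).foldl
        (fun tmp pl =>
          if verify g pl rv.1 ind then tmp.insert pl (tmp.getD pl 0 + rv.2) else tmp)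
        tmp)
    PySem.Dict.empty

def stepB (g : List (List Bool)) (ind : Nat) (counts : PySem.Dict (List Bool) Int) :
    PySem.Dict (List Bool) Int :=
  (expand g.length (colAt g ind)).foldl
    (fun tmp lr => tmp.insert lr.1 (tmp.getD lr.1 0 + counts.getD lr.2 0))
    PySem.Dict.empty

def initCount (g : List (List Bool)) : PySem.Dict (List Bool) Int :=
  (generatePossibleCol (g.length + 1)).foldl (fun d c => d.insert c 1) PySem.Dict.empty

def DInv (g : List (List Bool)) (dA dB : PySem.Dict (List Bool) Int) : Prop :=
  dA.keys.Nodup ∧ dB.keys.Nodup ∧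
  (∀ k ∈ dA.keys, k ∈ generatePossibleCol (g.length + 1)) ∧
  (∀ k ∈ dB.keys, k ∈ generatePossibleCol (g.length + 1)) ∧
  (∀ c, dA.getD c 0 = dB.getD c 0)

-- generatePossibleCol --------------------------------------------------------------------

lemma gen_succ (n : Nat) :
    generatePossibleCol (n + 1) =
      (generatePossibleCol n).map (fun t => t ++ [true]) ++
      (generatePossibleCol n).map (fun t => t ++ [false]) := by
  simp [generatePossibleCol, List.range_succ]

lemma gen_length {n : Nat} : ∀ c ∈ generatePossibleCol n, c.length = n := by
  induction n with
  | zero => simp [generatePossibleCol]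
  | succ n ih =>
    rw [gen_succ]
    intro c hc
    rcases List.mem_append.1 hc with h | h <;>
      · obtain ⟨t, ht, rfl⟩ := List.mem_map.1 h
        simp [ih t ht]

lemma gen_nodup (n : Nat) : (generatePossibleCol n).Nodup := by
  induction n with
  | zero => simp [generatePossibleCol]
  | succ n ih =>
    rw [gen_succ]
    refine List.Nodup.append ?_ ?_ ?_
    · exact ih.map (fun a b h => by simpa using h)
    · exact ih.map (fun a b h => by simpa using h)
    · intro c h1 h2
      obtain ⟨t, _, rfl⟩ := List.mem_map.1 h1
      obtain ⟨s, _, he⟩ := List.mem_map.1 h2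
      simp at he

lemma gen_complete {n : Nat} : ∀ c : List Bool, c.length = n → c ∈ generatePossibleCol n := by
  induction n with
  | zero => intro c hc; simp [List.length_eq_zero_iff.1 hc, generatePossibleCol]
  | succ n ih =>
    intro c hc
    have hne : c ≠ [] := by intro h; simp [h] at hc
    have hdec : c = c.dropLast ++ [c.getLast hne] := (List.dropLast_append_getLast hne).symm
    have hlen : c.dropLast.length = n := by simp [hc]
    rw [gen_succ, hdec]
    rcases Bool.eq_false_or_eq_true (c.getLast hne) with h | h <;> rw [h]
    · exact List.mem_append_left _ (List.mem_map_of_mem (ih _ hlen))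
    · exact List.mem_append_right _ (List.mem_map_of_mem (ih _ hlen))

-- generic sum lemmas ---------------------------------------------------------------------

lemma sum_extend {α : Type} [DecidableEq α] (L1 L2 : List α) (f : α → Int)
    (h1 : L1.Nodup) (h2 : L2.Nodup) (hsub : ∀ x ∈ L1, x ∈ L2)
    (hz : ∀ x ∈ L2, x ∉ L1 → f x = 0) :
    (L1.map f).sum = (L2.map f).sum := by
  rw [← List.sum_toFinset f h1, ← List.sum_toFinset f h2]
  refine Finset.sum_subset ?_ ?_
  · intro x hx; exact List.mem_toFinset.2 (hsub x (List.mem_toFinset.1 hx))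
  · intro x hx hnx; exact hz x (List.mem_toFinset.1 hx) (fun h => hnx (List.mem_toFinset.2 h))

lemma sum_ite_filter {α : Type} (L : List α) (p : α → Prop) [DecidablePred p] (f : α → Int) :
    (L.map (fun r => if p r then f r else 0)).sum = ((L.filter (fun r => decide (p r))).map f).sum := by
  induction L with
  | nil => simp
  | cons a L ih =>
    by_cases h : p a <;> simp [h, ih]

-- generic dict fold lemmas ---------------------------------------------------------------

lemma getD_foldl_insert_add {α : Type} (P : List α) (key : α → List Bool) (f : α → Int)
    (t0 : PySem.Dict (List Bool) Int) (x : List Bool) :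
    (P.foldl (fun t p => t.insert (key p) (t.getD (key p) 0 + f p)) t0).getD x 0
      = t0.getD x 0 + ((P.filter (fun p => key p == x)).map f).sum := by
  induction P generalizing t0 with
  | nil => simp
  | cons a P ih =>
    rw [List.foldl_cons, ih]
    by_cases h : key a = x
    · subst h; simp [PySem.Dict.getD_insert_self]; ring
    · simp [PySem.Dict.getD_insert_of_ne _ _ _ (fun hh => h hh.symm), h]

lemma memo_mono {F : List Bool → List (List Bool × List Bool)} (M : List (List Bool))
    (d : PySem.Dict (List Bool) (List (List Bool × List Bool))) {x : List Bool}
    (hd : d.contains x = true) :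
    (M.foldl (fun d col => if d.contains col then d else d.insert col (F col)) d).contains x
      = true := by
  induction M generalizing d with
  | nil => exact hd
  | cons b M ih =>
    rw [List.foldl_cons]
    cases hb : d.contains b
    · simp only [Bool.false_eq_true, if_false]
      exact ih _ (by rw [PySem.Dict.contains_insert, hd, Bool.or_true])
    · simp only [if_true]; exact ih d hd

lemma memo_get?_inv {L : List (List Bool)} {F : List Bool → List (List Bool × List Bool)}
    {d0 : PySem.Dict (List Bool) (List (List Bool × List Bool))}
    (h0 : ∀ c v, d0.get? c = some v → v = F c) :
    ∀ c v, ((L.foldl (fun d col => if d.contains col then d else d.insert col (F col)) d0).get? c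
      = some v) → v = F c := by
  induction L generalizing d0 with
  | nil => exact h0
  | cons a L ih =>
    rw [List.foldl_cons]
    cases h : d0.contains a
    · simp only [Bool.false_eq_true, if_false]
      refine ih ?_
      intro c' v' hv
      rw [PySem.Dict.get?_insert] at hv
      split at hv
      · next he => cases hv; rw [he]
      · exact h0 c' v' hv
    · simp only [if_true]; exact ih h0

lemma memo_contains {L : List (List Bool)} {F : List Bool → List (List Bool × List Bool)}
    (d0 : PySem.Dict (List Bool) (List (List Bool × List Bool))) {x : List Bool} (hx : x ∈ L) :
    (L.foldl (fun d col => if d.contains col then d else d.insert col (F col)) d0).contains x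
      = true := by
  induction L generalizing d0 with
  | nil => cases hx
  | cons a L ih =>
    rw [List.foldl_cons]
    rcases List.mem_cons.1 hx with rfl | hx'
    · cases h : d0.contains x
      · simp only [Bool.false_eq_true, if_false]
        exact memo_mono L _ (PySem.Dict.contains_insert_self _ _ _)
      · simp only [if_true]; exact memo_mono L d0 h
    · cases h : d0.contains a
      · simp only [Bool.false_eq_true, if_false]; exact ih _ hx'
      · simp only [if_true]; exact ih _ hx'

lemma memo_getD {L : List (List Bool)} {F : List Bool → List (List Bool × List Bool)}
    {x : List Bool} (hx : x ∈ L) :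
    (L.foldl (fun d col => if d.contains col then d else d.insert col (F col))
        PySem.Dict.empty).getD x [] = F x := by
  have hc := memo_contains (F := F) PySem.Dict.empty hx
  have h0 : ∀ c v,
      (PySem.Dict.empty : PySem.Dict (List Bool) (List (List Bool × List Bool))).get? c = some v →
        v = F c := by
    intro c v hv; rw [PySem.Dict.get?_empty] at hv; cases hv
  rcases ho : (L.foldl (fun d col => if d.contains col then d else d.insert col (F col))
      PySem.Dict.empty).get? x with _ | v
  · rw [PySem.Dict.contains_eq_isSome_get?, ho] at hc; cases hc
  · rw [PySem.Dict.getD_eq_get?_getD, ho]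
    exact memo_get?_inv h0 x v ho

-- verify vs patt ------------------------------------------------------------------------

lemma getD_last {l : List Bool} {k : Nat} (h : l.length = k+1) (d : Bool) :
    l.getD k d = l.getLastD d := by
  rw [List.getD_eq_getElem _ d (by omega), List.getLastD_eq_getLast?, List.getLast?_eq_getElem?]
  simp [h]

lemma all_beq_iff_map_eq {α : Type} (L : List α) (f c : α → Bool) :
    (L.all (fun i => f i == c i)) = true ↔ L.map f = L.map c := by
  induction L with
  | nil => simp
  | cons a L ih => simp [ih]

lemma colAt_eq_range_map (g : List (List Bool)) (ind : Nat) :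
    colAt g ind = (List.range g.length).map (fun i => (g.getD i []).getD ind false) := by
  apply List.ext_getElem
  · simp [colAt]
  · intro i h1 h2
    have hg : i < g.length := by simpa [colAt] using h1
    simp only [colAt, List.getElem_map, List.getElem_range]
    rw [List.getD_eq_getElem g [] hg]

lemma verify_eq_patt (g : List (List Bool)) (x r : List Bool) (ind : Nat)
    (hx : x.length = g.length + 1) :
    verify g x r ind = true ↔ patt g.length x r = colAt g ind := by
  rw [verify, hx, Nat.add_sub_cancel, colAt_eq_range_map, patt]
  exact all_beq_iff_map_eq _ _ _

-- expand --------------------------------------------------------------------------------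

lemma patt_append (k : Nat) (l r : List Bool) (a b : Bool)
    (hl : l.length = k + 1) (hr : r.length = k + 1) :
    patt (k + 1) (l ++ [a]) (r ++ [b]) =
      patt k l r ++
        [(boolInt (l.getLastD false) + boolInt a + boolInt (r.getLastD false) + boolInt b) == 1] := by
  unfold patt
  rw [List.range_succ, List.map_append]
  congr 1
  · refine List.map_congr_left ?_
    intro i hi
    have hik : i < k := List.mem_range.1 hi
    rw [List.getD_append _ _ _ _ (by omega), List.getD_append _ _ _ _ (by omega),
        List.getD_append _ _ _ _ (by omega), List.getD_append _ _ _ _ (by omega)]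
  · simp only [List.map_cons, List.map_nil]
    have e1 : (l ++ [a]).getD k false = l.getLastD false := by
      rw [List.getD_append _ _ _ _ (by omega), getD_last hl]
    have e2 : (l ++ [a]).getD (k + 1) false = a := by
      rw [show k + 1 = l.length from hl.symm, List.getD_eq_getElem _ false (by simp)]; simp
    have e3 : (r ++ [b]).getD k false = r.getLastD false := by
      rw [List.getD_append _ _ _ _ (by omega), getD_last hr]
    have e4 : (r ++ [b]).getD (k + 1) false = b := by
      rw [show k + 1 = r.length from hr.symm, List.getD_eq_getElem _ false (by simp)]; simp
    rw [e1, e2, e3, e4]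

lemma expand_succ (col : List Bool) (k : Nat) :
    expand (k+1) col = expandStep (col.getD k false) (expand k col) := by
  simp [expand, List.range_succ]

lemma mem_expand (h : Nat) (col : List Bool) (p : List Bool × List Bool) :
    p ∈ expand h col ↔
      p.1.length = h + 1 ∧ p.2.length = h + 1 ∧
        patt h p.1 p.2 = (List.range h).map (fun k => col.getD k false) := by
  induction h generalizing p with
  | zero =>
    obtain ⟨p1, p2⟩ := p
    simp only [expand, List.range_zero, List.foldl_nil, List.map_nil, patt]
    constructor
    · intro hp
      simp only [List.mem_cons, List.not_mem_nil, or_false] at hp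
      rcases hp with h | h | h | h <;>
        · simp only [Prod.mk.injEq] at h
          obtain ⟨rfl, rfl⟩ := h
          simp
    · rintro ⟨h1, h2, -⟩
      obtain ⟨x, rfl⟩ := List.length_eq_one_iff.1 h1
      obtain ⟨y, rfl⟩ := List.length_eq_one_iff.1 h2
      cases x <;> cases y <;> simp
  | succ k ih =>
    rw [expand_succ]
    obtain ⟨p1, p2⟩ := p
    constructor
    · intro hp
      simp only [expandStep, List.mem_flatMap, List.mem_filterMap] at hp
      obtain ⟨lr, hlr, ab, hab, hcond⟩ := hp
      split at hcond
      case isFalse => cases hcond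
      case isTrue hc =>
        cases hcond
        obtain ⟨h1, h2, h3⟩ := (ih lr).1 hlr
        refine ⟨by simp [h1], by simp [h2], ?_⟩
        rw [patt_append k lr.1 lr.2 ab.1 ab.2 h1 h2, h3, List.range_succ, List.map_append]
        simp only [List.map_cons, List.map_nil]
        congr 2
        exact eq_of_beq hc
    · rintro ⟨h1, h2, h3⟩
      have hne1 : p1 ≠ [] := by intro hh; simp [hh] at h1
      have hne2 : p2 ≠ [] := by intro hh; simp [hh] at h2
      have hd1 : p1 = p1.dropLast ++ [p1.getLast hne1] := (List.dropLast_append_getLast hne1).symm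
      have hd2 : p2 = p2.dropLast ++ [p2.getLast hne2] := (List.dropLast_append_getLast hne2).symm
      have hl1 : p1.dropLast.length = k + 1 := by simp [h1]
      have hl2 : p2.dropLast.length = k + 1 := by simp [h2]
      rw [hd1, hd2, patt_append k _ _ _ _ hl1 hl2, List.range_succ, List.map_append] at h3
      have h3' := List.append_inj' h3 (by simp)
      obtain ⟨hinit, hlast⟩ := h3'
      have hbit : ((boolInt (p1.dropLast.getLastD false) + boolInt (p1.getLast hne1) +
          boolInt (p2.dropLast.getLastD false) + boolInt (p2.getLast hne2)) == 1)
            = col.getD k false := by simpa using hlast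
      simp only [expandStep, List.mem_flatMap, List.mem_filterMap]
      refine ⟨(p1.dropLast, p2.dropLast), (ih _).2 ⟨hl1, hl2, hinit⟩,
        (p1.getLast hne1, p2.getLast hne2), ?_, ?_⟩
      · rcases Bool.eq_false_or_eq_true (p1.getLast hne1) with hh | hh <;>
          rcases Bool.eq_false_or_eq_true (p2.getLast hne2) with hh2 | hh2 <;>
            simp [hh, hh2]
      · rw [if_pos (by simpa using hbit)]
        rw [← hd1, ← hd2]

lemma mem_expandStep_decomp {colk : Bool} {lr p : List Bool × List Bool}
    (hp : p ∈ (fun lr =>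
      [(true, true), (true, false), (false, true), (false, false)].filterMap (fun ab =>
        if ((boolInt (lr.1.getLastD false) + boolInt ab.1 +
             boolInt (lr.2.getLastD false) + boolInt ab.2) == 1) == colk
        then some (lr.1 ++ [ab.1], lr.2 ++ [ab.2]) else none)) lr) :
    (p.1.dropLast, p.2.dropLast) = lr ∧ p.1 ≠ [] ∧ p.2 ≠ [] := by
  simp only [List.mem_filterMap] at hp
  obtain ⟨ab, _, hcond⟩ := hp
  split at hcond
  · cases hcond
    refine ⟨?_, by simp, by simp⟩
    simp
  · cases hcond

lemma nodup_expand (h : Nat) (col : List Bool) : (expand h col).Nodup := by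
  induction h with
  | zero => simp [expand]
  | succ k ih =>
    rw [expand_succ]
    unfold expandStep
    rw [List.nodup_flatMap]
    constructor
    · intro lr _
      refine List.Nodup.filterMap ?_ (by decide)
      intro ab ab' b hb hb'
      have eb : (lr.1 ++ [ab.1], lr.2 ++ [ab.2]) = b := by
        split at hb
        · exact Option.mem_some_iff.1 hb
        · cases hb
      have eb' : (lr.1 ++ [ab'.1], lr.2 ++ [ab'.2]) = b := by
        split at hb'
        · exact Option.mem_some_iff.1 hb'
        · cases hb'
      have he := eb.trans eb'.symm
      have h1 : ab.1 = ab'.1 := by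
        have := congrArg Prod.fst he
        simp only at this
        simpa using List.append_cancel_left this
      have h2 : ab.2 = ab'.2 := by
        have := congrArg Prod.snd he
        simp only at this
        simpa using List.append_cancel_left this
      exact Prod.ext h1 h2
    · refine List.Pairwise.imp ?_ ih
      intro a b hne x hxa hxb
      have da := (mem_expandStep_decomp (colk := col.getD k false) hxa).1
      have db := (mem_expandStep_decomp (colk := col.getD k false) hxb).1
      exact hne (da.symm.trans db)

-- step characterisations ----------------------------------------------------------------

lemma innerA_eq (g : List (List Bool)) (ind : Nat) (r : List Bool) (v : Int)
    (tmp : PySem.Dict (List Bool) Int) :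
    (generatePossibleCol (g.length + 1)).foldl
        (fun tmp pl => if verify g pl r ind then tmp.insert pl (tmp.getD pl 0 + v) else tmp) tmp
      = ((generatePossibleCol (g.length + 1)).filter (fun pl => verify g pl r ind)).foldl
          (fun tmp pl => tmp.insert pl (tmp.getD pl 0 + v)) tmp :=
  PySem.List.foldl_if_eq_foldl_filter (fun pl => verify g pl r ind)
    (fun (tmp : PySem.Dict (List Bool) Int) pl => tmp.insert pl (tmp.getD pl 0 + v)) _ _

lemma sum_const_filter_beq (L : List (List Bool)) (h : L.Nodup) (x : List Bool) (v : Int) :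
    ((L.filter (fun y => y == x)).map (fun _ => v)).sum = if x ∈ L then v else 0 := by
  induction L with
  | nil => simp
  | cons a L ih =>
    have hnd := h.of_cons
    have hna := (List.nodup_cons.1 h).1
    rw [List.filter_cons]
    by_cases hax : a = x
    · subst hax
      simp only [BEq.rfl, if_true, List.map_cons, List.sum_cons, ih hnd]
      simp [hna]
    · have : (a == x) = false := by simp [hax]
      rw [this]
      simp only [Bool.false_eq_true, if_false, ih hnd]
      have : (x ∈ a :: L) ↔ x ∈ L := by
        simp only [List.mem_cons, or_iff_right_iff_imp]
        intro hh; exact absurd hh.symm hax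
      rw [if_congr this rfl rfl]

lemma stepA_getD (g : List (List Bool)) (ind : Nat) (d : PySem.Dict (List Bool) Int)
    (x : List Bool) :
    (stepA g ind d).getD x 0 =
      (d.items.map (fun rv =>
        if x ∈ generatePossibleCol (g.length + 1) ∧ verify g x rv.1 ind = true
        then rv.2 else 0)).sum := by
  unfold stepA
  have main : ∀ (items : List (List Bool × Int)) (tmp : PySem.Dict (List Bool) Int),
      (items.foldl (fun tmp rv =>
          (generatePossibleCol (g.length + 1)).foldl
            (fun tmp pl =>
              if verify g pl rv.1 ind then tmp.insert pl (tmp.getD pl 0 + rv.2) else tmp)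
            tmp)
          tmp).getD x 0
        = tmp.getD x 0 + (items.map (fun rv =>
            if x ∈ generatePossibleCol (g.length + 1) ∧ verify g x rv.1 ind = true
            then rv.2 else 0)).sum := by
    intro items
    induction items with
    | nil => intro tmp; simp
    | cons rv items ih =>
      intro tmp
      rw [List.foldl_cons, innerA_eq g ind rv.1 rv.2 tmp, List.map_cons, List.sum_cons, ih]
      have h1 := getD_foldl_insert_add
        ((generatePossibleCol (g.length + 1)).filter (fun pl => verify g pl rv.1 ind))
        (fun pl => pl) (fun _ => rv.2)
        tmp x
      simp only at h1
      rw [h1, sum_const_filter_beq _ ((gen_nodup _).filter _) x rv.2]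
      have hmem : (x ∈ (generatePossibleCol (g.length + 1)).filter (fun pl => verify g pl rv.1 ind))
          ↔ (x ∈ generatePossibleCol (g.length + 1) ∧ verify g x rv.1 ind = true) := by
        simp [List.mem_filter]
      rw [if_congr hmem rfl rfl]
      ring
  rw [main d.items PySem.Dict.empty]
  simp

lemma stepB_getD (g : List (List Bool)) (ind : Nat) (d : PySem.Dict (List Bool) Int)
    (x : List Bool) :
    (stepB g ind d).getD x 0 =
      (((expand g.length (colAt g ind)).filter (fun lr => lr.1 == x)).map
        (fun lr => d.getD lr.2 0)).sum := by
  unfold stepB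
  rw [getD_foldl_insert_add (expand g.length (colAt g ind)) (fun lr => lr.1)
    (fun lr => d.getD lr.2 0) PySem.Dict.empty x]
  simp

lemma range_map_getD_self (l : List Bool) :
    (List.range l.length).map (fun k => l.getD k false) = l := by
  apply List.ext_getElem
  · simp
  · intro i h1 h2
    simp only [List.getElem_map, List.getElem_range]
    exact List.getD_eq_getElem l false h2

lemma step_getD_eq (g : List (List Bool)) (ind : Nat) (dA dB : PySem.Dict (List Bool) Int)
    (hinv : DInv g dA dB) :
    ∀ x, (stepA g ind dA).getD x 0 = (stepB g ind dB).getD x 0 := by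
  obtain ⟨hA, hB, hsA, hsB, hEq⟩ := hinv
  intro x
  rw [stepA_getD, stepB_getD]
  rw [PySem.Dict.items_eq_map_keys dA hA 0, List.map_map]
  have hf : ∀ r ∈ dA.keys,
      ((fun rv => if x ∈ generatePossibleCol (g.length + 1) ∧ verify g x rv.1 ind = true
          then rv.2 else 0) ∘ (fun k => (k, dA.getD k 0))) r
        = (fun r => if x ∈ generatePossibleCol (g.length + 1) ∧ verify g x r ind = true
            then dB.getD r 0 else 0) r := by
    intro r _
    simp only [Function.comp]
    rw [hEq r]
  rw [List.map_congr_left hf]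
  have hz : ∀ r ∈ generatePossibleCol (g.length + 1), r ∉ dA.keys →
      (fun r => if x ∈ generatePossibleCol (g.length + 1) ∧ verify g x r ind = true
        then dB.getD r 0 else 0) r = 0 := by
    intro r _ hr
    simp only
    rw [← hEq r, PySem.Dict.getD_of_not_contains dA 0
      (by rw [← Bool.not_eq_true]; intro hc; exact hr ((PySem.Dict.contains_iff_mem_keys dA r).1 hc))]
    exact ite_self 0
  rw [sum_extend dA.keys (generatePossibleCol (g.length + 1)) _ hA (gen_nodup _) hsA hz]
  by_cases hxC : x ∈ generatePossibleCol (g.length + 1)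
  · have hx : x.length = g.length + 1 := gen_length x hxC
    have hcolA : (colAt g ind).length = g.length := by simp [colAt]
    -- left sum over C as a sum over the filtered list
    rw [sum_ite_filter (generatePossibleCol (g.length + 1))
      (fun r => x ∈ generatePossibleCol (g.length + 1) ∧ verify g x r ind = true)
      (fun r => dB.getD r 0)]
    -- right sum: pull the pair's second component out
    have hrmap : ((expand g.length (colAt g ind)).filter (fun lr => lr.1 == x)).map
        (fun lr => dB.getD lr.2 0)
        = (((expand g.length (colAt g ind)).filter (fun lr => lr.1 == x)).map
            (fun lr => lr.2)).map (fun r => dB.getD r 0) := by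
      rw [List.map_map]; rfl
    rw [hrmap]
    -- the two index lists are permutations of one another
    have hperm : ((generatePossibleCol (g.length + 1)).filter
        (fun r => decide (x ∈ generatePossibleCol (g.length + 1) ∧ verify g x r ind = true))).Perm
        (((expand g.length (colAt g ind)).filter (fun lr => lr.1 == x)).map (fun lr => lr.2)) := by
      rw [List.perm_ext_iff_of_nodup ((gen_nodup _).filter _) ?_]
      · intro r
        simp only [List.mem_filter, List.mem_map, decide_eq_true_eq]
        constructor
        · rintro ⟨hrC, -, hv⟩
          refine ⟨(x, r), ⟨?_, by simp⟩, rfl⟩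
          rw [mem_expand]
          refine ⟨hx, gen_length r hrC, ?_⟩
          have := (verify_eq_patt g x r ind hx).1 hv
          rw [this]
          conv_rhs => rw [← hcolA]
          exact (range_map_getD_self _).symm
        · rintro ⟨p, hp, rfl⟩
          obtain ⟨hpe, hpx⟩ := hp
          have hpx' : p.1 = x := by simpa using hpx
          obtain ⟨h1, h2, h3⟩ := (mem_expand _ _ _).1 hpe
          have hrC : p.2 ∈ generatePossibleCol (g.length + 1) := gen_complete _ h2
          refine ⟨hrC, hxC, ?_⟩
          rw [verify_eq_patt g x p.2 ind hx, ← hpx']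
          rw [h3]
          conv_lhs => rw [← hcolA]
          exact range_map_getD_self _
      · refine List.Nodup.map_on ?_ ((nodup_expand _ _).filter _)
        intro p hp q hq hpq
        have hp1 : p.1 = x := by simpa using (List.mem_filter.1 hp).2
        have hq1 : q.1 = x := by simpa using (List.mem_filter.1 hq).2
        exact Prod.ext (hp1.trans hq1.symm) hpq
    exact (hperm.map (fun r => dB.getD r 0)).sum_eq
  · -- x is not a candidate column: both sides are 0
    have hl : ∀ r ∈ generatePossibleCol (g.length + 1),
        (if x ∈ generatePossibleCol (g.length + 1) ∧ verify g x r ind = true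
          then dB.getD r 0 else 0) = 0 := by
      intro r _
      rw [if_neg (fun hc => hxC hc.1)]
    have hfil : (expand g.length (colAt g ind)).filter (fun lr => lr.1 == x) = [] := by
      rw [List.filter_eq_nil_iff]
      intro p hp
      obtain ⟨h1, -, -⟩ := (mem_expand _ _ _).1 hp
      have : p.1 ∈ generatePossibleCol (g.length + 1) := gen_complete _ h1
      simp only [beq_iff_eq]
      intro he
      exact hxC (he ▸ this)
    rw [hfil]
    rw [List.map_congr_left hl]
    simp

lemma stepA_keys (g : List (List Bool)) (ind : Nat) (d : PySem.Dict (List Bool) Int) :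
    (stepA g ind d).keys.Nodup ∧
      ∀ k ∈ (stepA g ind d).keys, k ∈ generatePossibleCol (g.length + 1) := by
  unfold stepA
  have main : ∀ (items : List (List Bool × Int)) (tmp : PySem.Dict (List Bool) Int),
      tmp.keys.Nodup → (∀ k ∈ tmp.keys, k ∈ generatePossibleCol (g.length + 1)) →
      ((items.foldl (fun tmp rv =>
          (generatePossibleCol (g.length + 1)).foldl
            (fun tmp pl =>
              if verify g pl rv.1 ind then tmp.insert pl (tmp.getD pl 0 + rv.2) else tmp)
            tmp)
          tmp).keys.Nodup ∧
        ∀ k ∈ (items.foldl (fun tmp rv =>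
          (generatePossibleCol (g.length + 1)).foldl
            (fun tmp pl =>
              if verify g pl rv.1 ind then tmp.insert pl (tmp.getD pl 0 + rv.2) else tmp)
            tmp)
          tmp).keys, k ∈ generatePossibleCol (g.length + 1)) := by
    intro items
    induction items with
    | nil => intro tmp h1 h2; exact ⟨h1, h2⟩
    | cons rv items ih =>
      intro tmp h1 h2
      rw [List.foldl_cons]
      rw [innerA_eq g ind rv.1 rv.2 tmp]
      refine ih _ (PySem.Dict.nodup_keys_foldl_insert _ _ _ h1) ?_
      intro k hk
      rw [PySem.Dict.keys_foldl_insert] at hk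
      rcases (PySem.Set.mem_update _ _ _).1 hk with h | h
      · exact h2 k h
      · exact List.mem_of_mem_filter h
  exact main d.items PySem.Dict.empty (by simp) (by simp)

lemma stepB_keys (g : List (List Bool)) (ind : Nat) (d : PySem.Dict (List Bool) Int) :
    (stepB g ind d).keys.Nodup ∧
      ∀ k ∈ (stepB g ind d).keys, k ∈ generatePossibleCol (g.length + 1) := by
  unfold stepB
  constructor
  · exact PySem.Dict.nodup_keys_foldl_insert_key _ _ _ _ (by simp)
  · intro k hk
    rw [PySem.Dict.keys_foldl_insert_key] at hk
    have := (PySem.Set.mem_update _ _ _).1 hk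
    rcases this with h | h
    · simp at h
    · obtain ⟨p, hp, rfl⟩ := List.mem_map.1 h
      exact gen_complete _ ((mem_expand _ _ _).1 hp).1

lemma inv_step (g : List (List Bool)) (ind : Nat) (dA dB : PySem.Dict (List Bool) Int)
    (hinv : DInv g dA dB) : DInv g (stepA g ind dA) (stepB g ind dB) := by
  obtain ⟨hA, hB, hsA, hsB, hEq⟩ := hinv
  obtain ⟨hA', hsA'⟩ := stepA_keys g ind dA
  obtain ⟨hB', hsB'⟩ := stepB_keys g ind dB
  exact ⟨hA', hB', hsA', hsB', step_getD_eq g ind dA dB ⟨hA, hB, hsA, hsB, hEq⟩⟩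

lemma inv_fold (g : List (List Bool)) (L : List Int) (dA dB : PySem.Dict (List Bool) Int)
    (hinv : DInv g dA dB) :
    DInv g (L.foldl (fun d i => stepA g i.toNat d) dA) (L.foldl (fun d i => stepB g i.toNat d) dB) := by
  induction L generalizing dA dB with
  | nil => exact hinv
  | cons i L ih =>
    rw [List.foldl_cons, List.foldl_cons]
    exact ih _ _ (inv_step g i.toNat dA dB hinv)

lemma values_sum_eq (g : List (List Bool)) (dA dB : PySem.Dict (List Bool) Int)
    (hinv : DInv g dA dB) : dA.values.sum = dB.values.sum := by
  obtain ⟨hA, hB, hsA, hsB, hEq⟩ := hinv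
  rw [PySem.Dict.values_eq_map_keys dA hA 0, PySem.Dict.values_eq_map_keys dB hB 0]
  have hC := gen_nodup (g.length + 1)
  have zA : ∀ x ∈ generatePossibleCol (g.length + 1), x ∉ dA.keys → dA.getD x 0 = 0 := by
    intro x _ hx
    exact PySem.Dict.getD_of_not_contains dA 0
      (by rw [← Bool.not_eq_true]; intro hc; exact hx ((PySem.Dict.contains_iff_mem_keys dA x).1 hc))
  have zB : ∀ x ∈ generatePossibleCol (g.length + 1), x ∉ dB.keys → dB.getD x 0 = 0 := by
    intro x _ hx
    exact PySem.Dict.getD_of_not_contains dB 0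
      (by rw [← Bool.not_eq_true]; intro hc; exact hx ((PySem.Dict.contains_iff_mem_keys dB x).1 hc))
  rw [sum_extend dA.keys _ _ hA hC hsA zA, sum_extend dB.keys _ _ hB hC hsB zB]
  exact congrArg List.sum (List.map_congr_left (fun c _ => hEq c))

lemma inv_init (g : List (List Bool)) : DInv g (initCount g) (initCount g) := by
  have hC := gen_nodup (g.length + 1)
  have hkeys : (initCount g).keys = generatePossibleCol (g.length + 1) := by
    unfold initCount
    rw [PySem.Dict.keys_foldl_insert]
    have : (PySem.Dict.empty : PySem.Dict (List Bool) Int).keys = [] := by simp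
    rw [this]
    exact PySem.Set.ofList_eq_self_of_nodup _ hC
  refine ⟨?_, ?_, ?_, ?_, fun c => rfl⟩ <;> rw [hkeys] <;> first | exact hC | exact fun k hk => hk

lemma pyRange_down_mem {w : Nat} {x : Int}
    (hx : x ∈ PySem.List.pyRange ((w : Int) - 1) (-1) (-1)) : 0 ≤ x ∧ x.toNat < w := by
  simp only [PySem.List.pyRange] at hx
  norm_num at hx
  rcases hx with ⟨k, hk, rfl⟩
  split at hk
  · next h =>
    constructor
    · omega
    · omega
  · simp at hk

lemma solution_eq_view (g : List (List Bool)) :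
    solution g = ((PySem.List.pyRange ((g.headI.length : Int) - 1) (-1) (-1)).foldl
      (fun d i => stepA g i.toNat d) (initCount g)).values.sum := by
  rfl

lemma solution_alt_eq_view (g : List (List Bool)) :
    solution_alt g = ((PySem.List.pyRange ((g.headI.length : Int) - 1) (-1) (-1)).foldl
      (fun d i => stepB g i.toNat d) (initCount g)).values.sum := by
  unfold solution_alt stepB
  refine congrArg (fun d : PySem.Dict (List Bool) Int => d.values.sum) ?_
  generalize hI : (List.foldl (fun (d : PySem.Dict (List Bool) Int) c => d.insert c 1)
      PySem.Dict.empty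
      (List.foldl (fun cs _ => List.map (fun c => c ++ [true]) cs ++ List.map (fun c => c ++ [false]) cs)
        [[]] (List.range (g.length + 1)))) = D
  have hI2 : initCount g = D := hI
  rw [hI2]
  apply PySem.List.foldl_congr_mem
  intro acc i hi
  obtain ⟨h0, hlt⟩ := pyRange_down_mem hi
  have hcol : ((List.range g.headI.length).map (fun i => g.map (fun row => row.getD i false))).getD i.toNat []
      = colAt g i.toNat := by
    rw [List.getD_eq_getElem _ [] (by simpa using hlt)]
    simp [colAt]
  rw [hcol]
  congr 1
  exact memo_getD (List.mem_map.2 ⟨i.toNat, List.mem_range.2 hlt, rfl⟩)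

-- ===== VERDICT (by name: the statement is the Claim_ definition above) =====
theorem solution_spec : Claim_equal_solution := by
  intro g _ _
  show solution g = solution_alt g
  rw [solution_eq_view, solution_alt_eq_view]
  exact values_sum_eq g _ _ (inv_fold g _ _ _ (inv_init g))
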